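-- pv_equiv track=rewrite | github.com/klavakoly/global_networks | lab_01/hemming.py | calculate_parity_bit
-- ===== SOURCE A (Python) =====
-- BYTE_SIZE = 8
--
-- def calculate_parity_bit(word, msg_len):
--     t = 0
--     for i in range(msg_len):
--         byte_index = i // BYTE_SIZE
--         bit_index = i % BYTE_SIZE
--         mask = 128 >> bit_index
--         bit = 0
--         if (word[byte_index] & mask) > 0:
--             bit = 1
--         t = t ^ bit
--
--     return t
-- ===== SOURCE B (Python) =====
-- BYTE_SIZE = 8
--
-- def calculate_parity_bit(word, msg_len):
--     if msg_len <= 0: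
--         return 0
--     full, rem = divmod(msg_len, BYTE_SIZE)
--     parity = 0
--     for i in range(full):
--         parity ^= (word[i] & 0xFF).bit_count() & 1
--     if rem:
--         mask = (0xFF << (BYTE_SIZE - rem)) & 0xFF
--         parity ^= (word[full] & mask).bit_count() & 1
--     return parity
-- ===== Notes on version B (the rewrite author's own statement) =====
-- stated objective: faster
-- what changed: B computes the parity byte-at-a-time with int.bit_count() on whole (masked) bytes instead of A's per-bit loop that builds a mask and tests each bit individually.
import Mathlib
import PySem

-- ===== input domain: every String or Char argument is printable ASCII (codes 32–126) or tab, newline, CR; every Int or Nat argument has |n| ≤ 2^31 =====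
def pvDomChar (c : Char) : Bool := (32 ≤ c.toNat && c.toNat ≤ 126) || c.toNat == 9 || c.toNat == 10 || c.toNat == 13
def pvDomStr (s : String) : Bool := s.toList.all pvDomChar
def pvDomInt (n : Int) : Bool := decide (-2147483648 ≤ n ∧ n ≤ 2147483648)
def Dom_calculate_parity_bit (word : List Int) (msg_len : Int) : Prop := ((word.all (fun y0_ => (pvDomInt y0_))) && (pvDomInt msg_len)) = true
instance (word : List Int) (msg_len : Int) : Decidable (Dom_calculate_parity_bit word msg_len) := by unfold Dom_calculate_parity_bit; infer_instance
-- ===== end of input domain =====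

-- B replaces A's per-bit loop by a per-byte loop that xors the popcount parity of each (masked) byte.

-- ===== PORT A =====
def calculate_parity_bit (word : List Int) (msg_len : Int) : Int :=
  (PySem.List.pyRange 0 msg_len 1).foldl (fun t i =>
    let byte_index := PySem.Int.floordiv i 8
    let bit_index := PySem.Int.mod i 8
    let mask : Int := (128 : Int) >>> bit_index.toNat
    let bit : Int := if 0 < PySem.Int.band (PySem.List.pyGetD word byte_index 0) mask then 1 else 0
    PySem.Int.bxor t bit) 0

-- ===== PORT B =====
def calculate_parity_bit_alt (word : List Int) (msg_len : Int) : Int :=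
  if msg_len ≤ 0 then 0 else
  let full := PySem.Int.floordiv msg_len 8
  let rem := PySem.Int.mod msg_len 8
  let parity : Int := (PySem.List.pyRange 0 full 1).foldl (fun p i =>
    PySem.Int.bxor p (PySem.Int.band (↑(PySem.Int.bitCount (PySem.Int.band (PySem.List.pyGetD word i 0) 255))) 1)) 0
  if rem ≠ 0 then
    let mask : Int := PySem.Int.band ((255 : Int) <<< (8 - rem).toNat) 255
    PySem.Int.bxor parity (PySem.Int.band (↑(PySem.Int.bitCount (PySem.Int.band (PySem.List.pyGetD word full 0) mask))) 1)
  else parity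

-- ===== PRECONDITION & SPEC =====
-- Pre_ excludes exactly the inputs where Python A raises IndexError: msg_len reaching past the last byte of word.
def Pre_calculate_parity_bit (word : List Int) (msg_len : Int) : Prop := msg_len ≤ 8 * word.length
instance (word : List Int) (msg_len : Int) : Decidable (Pre_calculate_parity_bit word msg_len) := by unfold Pre_calculate_parity_bit; infer_instance
def pvWitness_calculate_parity_bit : List Int × Int := ([170, 255], 11)

def Spec_calculate_parity_bit (word : List Int) (msg_len : Int) (out : Int) : Prop := out = calculate_parity_bit_alt word msg_len
instance (word : List Int) (msg_len : Int) (out : Int) : Decidable (Spec_calculate_parity_bit word msg_len out) := by unfold Spec_calculate_parity_bit; infer_instance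

-- ===== CLAIM (what is proved, stated in full; the proofs are below) =====
def Claim_equal_calculate_parity_bit : Prop := ∀ (word : List Int) (msg_len : Int), Dom_calculate_parity_bit word msg_len → Pre_calculate_parity_bit word msg_len → Spec_calculate_parity_bit word msg_len (calculate_parity_bit word msg_len)

-- ===== LEMMAS AND PROOFS =====

-- xor algebra for PySem.Int.bxor
theorem pv_bxor_eq_xor (a b : Int) : PySem.Int.bxor a b = Int.xor a b := by
  unfold PySem.Int.bxor
  rcases a with m | m <;> rcases b with n | n <;> simp [Int.xor] <;> omega

theorem pv_bxor_assoc (a b c : Int) : PySem.Int.bxor (PySem.Int.bxor a b) c = PySem.Int.bxor a (PySem.Int.bxor b c) := by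
  simp only [pv_bxor_eq_xor]
  rcases a with m | m <;> rcases b with n | n <;> rcases c with k | k <;>
    simp [Int.xor, Nat.xor_assoc]

theorem pv_bxor_zero_left (a : Int) : PySem.Int.bxor 0 a = a := by
  unfold PySem.Int.bxor
  rcases a with m | m <;> simp <;> omega

theorem pv_bxor_zero_right (a : Int) : PySem.Int.bxor a 0 = a := by
  unfold PySem.Int.bxor
  rcases a with m | m <;> simp <;> omega

-- pull the initial accumulator out of an xor-fold
theorem pv_foldl_bxor_init {α : Type} (f : α → Int) (l : List α) (t : Int) :
    l.foldl (fun t k => PySem.Int.bxor t (f k)) t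
      = PySem.Int.bxor t (l.foldl (fun t k => PySem.Int.bxor t (f k)) 0) := by
  induction l generalizing t with
  | nil => simp [pv_bxor_zero_right]
  | cons a l ih =>
    simp only [List.foldl_cons]
    rw [ih (PySem.Int.bxor t (f a)), ih (PySem.Int.bxor 0 (f a)), pv_bxor_zero_left, pv_bxor_assoc]

-- the low byte of an integer
def pvLowByte (b : Int) : Nat := (PySem.Int.band b 255).toNat

theorem pv_band_255 (b : Int) : PySem.Int.band b 255 = (pvLowByte b : Nat) := by
  unfold pvLowByte PySem.Int.band
  rcases b with m | m <;> simp

theorem pv_lowByte_lt (b : Int) : pvLowByte b < 256 := by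
  unfold pvLowByte PySem.Int.band
  rcases b with m | m <;> simp
  · have := Nat.and_le_right (n := m) (m := 255); omega
  · have : 255 &&& ((-Int.negSucc m - 1).toNat) ≤ 255 := Nat.and_le_left; omega

theorem pv_land_255_mod (k : Nat) : 255 &&& k = k % 256 := by
  rw [Nat.land_comm]
  have := Nat.and_two_pow_sub_one_eq_mod k 8
  norm_num at this
  exact this

-- subtracting the common bits is bitwise set difference
theorem pv_sub_land (x : Nat) : ∀ y : Nat, x - (x &&& y) = x.ldiff y := by
  induction x using Nat.binaryRec with
  | zero =>
    intro y
    apply Nat.eq_of_testBit_eq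
    intro i
    simp [Nat.testBit_ldiff]
  | bit b x ih =>
    intro y
    cases y using Nat.bitCasesOn with
    | bit c y' =>
      rw [Nat.land_bit, Nat.ldiff_bit]
      have hle : x &&& y' ≤ x := Nat.and_le_left
      have hx := ih y'
      cases b <;> cases c <;> simp [Nat.bit_val, ← hx] <;> omega

theorem pv_ldiff_mask (m k : Nat) (hm : m < 256) : m.ldiff k = (Nat.ldiff 255 k) &&& m := by
  apply Nat.eq_of_testBit_eq
  intro i
  simp only [Nat.testBit_ldiff, Nat.testBit_land]
  by_cases h : i < 8
  · have h255 : (255 : Nat).testBit i = true := by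
      have : (255 : Nat) = 2 ^ 8 - 1 := by norm_num
      rw [this, Nat.testBit_two_pow_sub_one]; simp [h]
    rw [h255]
    cases m.testBit i <;> cases k.testBit i <;> rfl
  · have hmb : m.testBit i = false := by
      apply Nat.testBit_eq_false_of_lt
      calc m < 256 := hm
        _ = 2 ^ 8 := by norm_num
        _ ≤ 2 ^ i := Nat.pow_le_pow_right (by norm_num) (by omega)
    simp [hmb]

-- localization: band against a sub-byte mask only sees the low byte
theorem pv_band_local (b : Int) (m : Nat) (hm : m < 256) :
    PySem.Int.band b (m : Int) = ((pvLowByte b &&& m : Nat) : Int) := by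
  rcases b with x | k
  · have hL : pvLowByte (Int.ofNat x) = x &&& 255 := by
      unfold pvLowByte PySem.Int.band; simp
    rw [hL]
    have hlhs : PySem.Int.band (Int.ofNat x) (m : Int) = ((x &&& m : Nat) : Int) := by
      unfold PySem.Int.band; simp
    rw [hlhs]
    congr 1
    rw [Nat.land_assoc, pv_land_255_mod, Nat.mod_eq_of_lt hm]
  · have hL : pvLowByte (Int.negSucc k) = 255 - (255 &&& k) := by
      unfold pvLowByte PySem.Int.band; simp
    have hlhs : PySem.Int.band (Int.negSucc k) (m : Int) = ((m - (m &&& k) : Nat) : Int) := by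
      unfold PySem.Int.band
      rw [if_neg (by omega), if_pos (by positivity)]
      have hk : (-Int.negSucc k - 1).toNat = k := by rw [Int.negSucc_eq]; omega
      rw [hk, Int.toNat_natCast]
    rw [hlhs, hL]
    congr 1
    rw [pv_sub_land m k, pv_sub_land 255 k, pv_ldiff_mask m k hm]

-- per-byte xor of bits equals popcount parity of the masked byte (finite check over all bytes and remainders)
set_option maxRecDepth 100000 in
set_option maxHeartbeats 4000000 in
theorem pv_byte_parity : ∀ (c : Fin 256) (r : Fin 9),
    (List.range r.val).foldl
        (fun t j => PySem.Int.bxor t (if 0 < (c.val &&& (128 >>> j) : Nat) then (1:Int) else 0)) 0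
      = ((PySem.Int.bitCount ((c.val &&& ((255 <<< (8 - r.val)) &&& 255) : Nat) : Int) &&& 1 : Nat) : Int) := by
  decide

-- Nat-level reformulations of the two ports
def pvBitW (word : List Int) (k : Nat) : Int :=
  if 0 < PySem.Int.band (word.getD (k / 8) 0) ((128 : Int) >>> (k % 8)) then 1 else 0

def pvSumA (word : List Int) (n : Nat) : Int :=
  (List.range n).foldl (fun t k => PySem.Int.bxor t (pvBitW word k)) 0

def pvByteP (word : List Int) (i : Nat) : Int :=
  PySem.Int.band (↑(PySem.Int.bitCount (PySem.Int.band (word.getD i 0) 255))) 1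

def pvSumB (word : List Int) (q : Nat) : Int :=
  (List.range q).foldl (fun p i => PySem.Int.bxor p (pvByteP word i)) 0

def pvMaskedP (b : Int) (r : Nat) : Int :=
  ((PySem.Int.bitCount ((pvLowByte b &&& ((255 <<< (8 - r)) &&& 255) : Nat) : Int) &&& 1 : Nat) : Int)

-- the bits of one byte, xored, through the localization lemma
theorem pv_byte_fold (b : Int) (r : Nat) (hr : r ≤ 8) :
    (List.range r).foldl
        (fun (t : Int) (j : Nat) => PySem.Int.bxor t (if 0 < PySem.Int.band b ((128 : Int) >>> j) then (1:Int) else 0)) 0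
      = pvMaskedP b r := by
  have hfun : (fun (t : Int) (j : Nat) => PySem.Int.bxor t (if 0 < PySem.Int.band b ((128 : Int) >>> j) then (1:Int) else 0))
      = (fun (t : Int) (j : Nat) => PySem.Int.bxor t (if 0 < (pvLowByte b &&& (128 >>> j) : Nat) then (1:Int) else 0)) := by
    funext t j
    have hlt : (128 >>> j : Nat) < 256 := by
      have : (128 >>> j : Nat) ≤ 128 := Nat.shiftRight_le _ _
      omega
    have hsh : (128 : Int) >>> j = ((128 >>> j : Nat) : Int) := rfl
    rw [hsh, pv_band_local b _ hlt]
    congr 1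
    simp [Int.natCast_pos]
  rw [hfun]
  have h := pv_byte_parity ⟨pvLowByte b, pv_lowByte_lt b⟩ ⟨r, by omega⟩
  simpa [pvMaskedP] using h

theorem pv_byteP_eq (word : List Int) (q : Nat) : pvByteP word q = pvMaskedP (word.getD q 0) 8 := by
  unfold pvByteP pvMaskedP
  rw [pv_band_255]
  have h1 : (pvLowByte (word.getD q 0) &&& ((255 <<< (8 - 8)) &&& 255) : Nat) = pvLowByte (word.getD q 0) := by
    have h2 : ((255 <<< (8 - 8)) &&& 255 : Nat) = 255 := by decide
    rw [h2, Nat.land_comm, pv_land_255_mod, Nat.mod_eq_of_lt (pv_lowByte_lt _)]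
  rw [h1]
  rw [PySem.Int.band_of_nonneg (by positivity) (by norm_num)]
  simp

-- one block of up to eight bits of the bit fold
theorem pv_sumA_block (word : List Int) (q r : Nat) (hr : r ≤ 8) :
    pvSumA word (8 * q + r) = PySem.Int.bxor (pvSumA word (8 * q)) (pvMaskedP (word.getD q 0) r) := by
  unfold pvSumA
  rw [List.range_add, List.foldl_append, List.foldl_map]
  have hcong : List.foldl (fun (x : Int) (y : Nat) => PySem.Int.bxor x (pvBitW word (8 * q + y)))
        (List.foldl (fun t k => PySem.Int.bxor t (pvBitW word k)) 0 (List.range (8 * q))) (List.range r)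
      = List.foldl (fun (t : Int) (j : Nat) => PySem.Int.bxor t (if 0 < PySem.Int.band (word.getD q 0) ((128 : Int) >>> j) then (1:Int) else 0))
        (List.foldl (fun t k => PySem.Int.bxor t (pvBitW word k)) 0 (List.range (8 * q))) (List.range r) := by
    apply PySem.List.foldl_congr_mem
    intro acc j hj
    have hj8 : j < 8 := lt_of_lt_of_le (List.mem_range.mp hj) hr
    unfold pvBitW
    rw [show (8 * q + j) / 8 = q by omega, show (8 * q + j) % 8 = j by omega]
  rw [hcong, pv_foldl_bxor_init, pv_byte_fold _ r hr]

theorem pv_sumB_succ (word : List Int) (q : Nat) :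
    pvSumB word (q + 1) = PySem.Int.bxor (pvSumB word q) (pvByteP word q) := by
  unfold pvSumB
  rw [List.range_succ, List.foldl_append]
  simp

-- the bit fold over a whole number of bytes equals the byte fold
theorem pv_sumA_bytes (word : List Int) : ∀ q : Nat, pvSumA word (8 * q) = pvSumB word q := by
  intro q
  induction q with
  | zero => simp [pvSumA, pvSumB]
  | succ q ih =>
    have h8 : 8 * (q + 1) = 8 * q + 8 := by ring
    rw [h8, pv_sumA_block word q 8 le_rfl, ih, pv_sumB_succ, pv_byteP_eq]

-- the bit fold split at the last full byte
theorem pv_sumA_split (word : List Int) (n : Nat) :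
    pvSumA word n = PySem.Int.bxor (pvSumB word (n / 8)) (pvMaskedP (word.getD (n / 8) 0) (n % 8)) := by
  have hn : n = 8 * (n / 8) + n % 8 := by omega
  calc pvSumA word n = pvSumA word (8 * (n / 8) + n % 8) := by rw [← hn]
    _ = PySem.Int.bxor (pvSumA word (8 * (n / 8))) (pvMaskedP (word.getD (n / 8) 0) (n % 8)) :=
        pv_sumA_block word (n / 8) (n % 8) (by omega)
    _ = PySem.Int.bxor (pvSumB word (n / 8)) (pvMaskedP (word.getD (n / 8) 0) (n % 8)) := by
        rw [pv_sumA_bytes]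

theorem pv_maskedP_zero (b : Int) : pvMaskedP b 0 = 0 := by
  unfold pvMaskedP
  have h : ((255 <<< (8 - 0)) &&& 255 : Nat) = 0 := by decide
  rw [h]
  have h0 : pvLowByte b &&& 0 = 0 := by
    apply Nat.eq_of_testBit_eq; intro i; simp
  rw [h0]
  decide

-- bridge: port A equals the Nat-level bit fold
theorem pv_portA_eq (word : List Int) (msg_len : Int) :
    calculate_parity_bit word msg_len = pvSumA word msg_len.toNat := by
  unfold calculate_parity_bit pvSumA
  rw [PySem.List.pyRange_one, List.foldl_map]
  simp only [Int.sub_zero]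
  apply PySem.List.foldl_congr_mem
  intro acc k _
  have h1 : PySem.Int.floordiv (↑k) 8 = ((k / 8 : Nat) : Int) := by
    exact_mod_cast PySem.Int.floordiv_natCast k 8
  have h2 : PySem.Int.mod (↑k) 8 = ((k % 8 : Nat) : Int) := by
    exact_mod_cast PySem.Int.mod_natCast k 8
  rw [zero_add, h1, h2, Int.toNat_natCast, PySem.List.pyGetD_natCast]
  rfl

-- bridge: port B's byte loop equals the Nat-level byte fold
theorem pv_portB_fold (word : List Int) (q : Nat) :
    (PySem.List.pyRange 0 (↑q) 1).foldl (fun p i =>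
        PySem.Int.bxor p (PySem.Int.band (↑(PySem.Int.bitCount (PySem.Int.band (PySem.List.pyGetD word i 0) 255))) 1)) 0
      = pvSumB word q := by
  unfold pvSumB
  rw [PySem.List.pyRange_one, List.foldl_map]
  simp only [Int.sub_zero, Int.toNat_natCast]
  apply PySem.List.foldl_congr_mem
  intro acc k _
  rw [zero_add, PySem.List.pyGetD_natCast]
  rfl

-- bridge: port B equals the Nat-level byte fold with the partial-byte term
theorem pv_portB_eq (word : List Int) (msg_len : Int) (h : 0 < msg_len) :
    calculate_parity_bit_alt word msg_len =
      (if msg_len.toNat % 8 ≠ 0 then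
        PySem.Int.bxor (pvSumB word (msg_len.toNat / 8)) (pvMaskedP (word.getD (msg_len.toNat / 8) 0) (msg_len.toNat % 8))
      else pvSumB word (msg_len.toNat / 8)) := by
  obtain ⟨n, hn, rfl⟩ : ∃ n : Nat, 0 < n ∧ msg_len = (n : Int) :=
    ⟨msg_len.toNat, by omega, by omega⟩
  have hfull : PySem.Int.floordiv (↑n) 8 = ((n / 8 : Nat) : Int) := by
    exact_mod_cast PySem.Int.floordiv_natCast n 8
  have hrem : PySem.Int.mod (↑n) 8 = ((n % 8 : Nat) : Int) := by
    exact_mod_cast PySem.Int.mod_natCast n 8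
  unfold calculate_parity_bit_alt
  rw [if_neg (by exact_mod_cast (by omega : ¬ ((n : Int) ≤ 0)))]
  dsimp only
  rw [hfull, hrem, pv_portB_fold word (n / 8), Int.toNat_natCast]
  by_cases hr : n % 8 = 0
  · rw [if_neg (by simp [hr]), if_neg (by simp [hr])]
  · rw [if_pos (by exact_mod_cast hr), if_pos hr]
    congr 1
    have hsub : ((8 : Int) - ↑(n % 8)).toNat = 8 - n % 8 := by omega
    rw [hsub]
    have hshift : (255 : Int) <<< (8 - n % 8) = (((255 <<< (8 - n % 8)) : Nat) : Int) := rfl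
    have hmaskv : PySem.Int.band ((255 : Int) <<< (8 - n % 8)) 255
        = (((255 <<< (8 - n % 8)) &&& 255 : Nat) : Int) := by
      rw [hshift, PySem.Int.band_of_nonneg (Int.natCast_nonneg _) (by norm_num)]
      norm_cast
    have hM : ((255 <<< (8 - n % 8)) &&& 255 : Nat) < 256 := by
      have := Nat.and_le_right (n := (255 <<< (8 - n % 8) : Nat)) (m := 255)
      omega
    rw [hmaskv, PySem.List.pyGetD_natCast, pv_band_local (word.getD (n / 8) 0) _ hM,
      PySem.Int.band_of_nonneg (by positivity) (by norm_num)]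
    unfold pvMaskedP
    simp

-- ===== VERDICT (by name: the statement is the Claim_ definition above) =====
theorem calculate_parity_bit_spec : Claim_equal_calculate_parity_bit := by
  intro word msg_len _ _
  unfold Spec_calculate_parity_bit
  by_cases hml : msg_len ≤ 0
  · unfold calculate_parity_bit calculate_parity_bit_alt
    rw [PySem.List.pyRange_one_eq_nil (by omega), if_pos hml]
    rfl
  · rw [pv_portA_eq, pv_portB_eq word msg_len (by omega), pv_sumA_split]
    by_cases hr : msg_len.toNat % 8 = 0
    · rw [if_neg (by simp [hr]), hr, pv_maskedP_zero, pv_bxor_zero_right]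
    · rw [if_pos hr]
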